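-- pv_equiv track=rewrite | github.com/Pexe171/AgentCaixa | rag_app/agent/semantic_memory.py | build_semantic_summary
-- ===== SOURCE A (Python) =====
-- def build_semantic_summary(recent_entries: list[tuple[str, str]]) -> str:
--     """Consolida os fatos mais recentes em resumo curto e persistível."""
--
--     if not recent_entries:
--         return "Sem fatos recentes para resumir."
--
--     latest_user = ""
--     latest_agent = ""
--     for role, content in reversed(recent_entries):
--         if role == "usuario" and not latest_user:
--             latest_user = content
--         if role == "agente" and not latest_agent:
--             latest_agent = content
--         if latest_user and latest_agent:
--             break
--
--     factual_points = []
--     if latest_user: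
--         factual_points.append(f"Pedido do cliente: {latest_user[:220]}")
--     if latest_agent:
--         factual_points.append(f"Resposta entregue: {latest_agent[:220]}")
--
--     if factual_points:
--         return " | ".join(factual_points)
--     return "Sem fatos recentes para resumir."
-- ===== SOURCE B (Python) =====
-- def build_semantic_summary(recent_entries: list[tuple[str, str]]) -> str:
--     """Consolida os fatos mais recentes em resumo curto e persistível."""
--
--     if not recent_entries:
--         return "Sem fatos recentes para resumir."
--
--     users = [c for r, c in recent_entries if r == "usuario" and c]
--     agents = [c for r, c in recent_entries if r == "agente" and c]
--
--     points = ([f"Pedido do cliente: {users[-1][:220]}"] if users else []) + \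
--              ([f"Resposta entregue: {agents[-1][:220]}"] if agents else [])
--
--     return " | ".join(points) if points else "Sem fatos recentes para resumir."
-- ===== Notes on version B (the rewrite author's own statement) =====
-- stated objective: simpler
-- what changed: Replaces A's stateful reverse scan with early break by two forward list comprehensions of non-empty user/agent messages, picking the last element of each; the formatting tail is unchanged.
import Mathlib
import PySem

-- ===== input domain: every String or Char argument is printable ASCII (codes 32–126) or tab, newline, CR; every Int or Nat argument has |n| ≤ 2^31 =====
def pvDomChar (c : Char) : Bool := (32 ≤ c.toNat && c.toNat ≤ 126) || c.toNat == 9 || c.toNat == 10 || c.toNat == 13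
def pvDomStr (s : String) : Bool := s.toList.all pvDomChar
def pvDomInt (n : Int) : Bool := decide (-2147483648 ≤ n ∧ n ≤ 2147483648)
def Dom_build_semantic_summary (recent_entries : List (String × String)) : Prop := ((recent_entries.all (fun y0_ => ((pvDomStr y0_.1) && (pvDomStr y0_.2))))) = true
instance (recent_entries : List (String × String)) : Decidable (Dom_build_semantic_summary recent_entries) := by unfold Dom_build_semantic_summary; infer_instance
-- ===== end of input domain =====

-- B replaces A's reverse scan with early break by two forward comprehensions and a last-element pick; objective: simpler.


-- ===== PORT A =====
-- A's loop over reversed(recent_entries), with the early break once both are set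
def pvLoopA : List (String × String) → String → String → String × String
  | [], lu, la => (lu, la)
  | (role, content) :: rest, lu, la =>
    let lu' := if role == "usuario" && lu == "" then content else lu
    let la' := if role == "agente" && la == "" then content else la
    if lu' != "" && la' != "" then (lu', la') else pvLoopA rest lu' la'

def build_semantic_summary (recent_entries : List (String × String)) : String :=
  if recent_entries == [] then "Sem fatos recentes para resumir." else
  let p := pvLoopA recent_entries.reverse "" ""
  let factual_points :=
    (if p.1 != "" then ["Pedido do cliente: " ++ PySem.Str.slice p.1 none (some 220)] else []) ++
    (if p.2 != "" then ["Resposta entregue: " ++ PySem.Str.slice p.2 none (some 220)] else [])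
  if factual_points != [] then PySem.Str.join " | " factual_points
  else "Sem fatos recentes para resumir."

-- ===== PORT B =====
def build_semantic_summary_alt (recent_entries : List (String × String)) : String :=
  if recent_entries == [] then "Sem fatos recentes para resumir." else
  let users := (recent_entries.filter (fun p => p.1 == "usuario" && p.2 != "")).map Prod.snd
  let agents := (recent_entries.filter (fun p => p.1 == "agente" && p.2 != "")).map Prod.snd
  let points :=
    (match users.getLast? with
     | some u => ["Pedido do cliente: " ++ PySem.Str.slice u none (some 220)]
     | none => []) ++
    (match agents.getLast? with
     | some a => ["Resposta entregue: " ++ PySem.Str.slice a none (some 220)]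
     | none => [])
  if points != [] then PySem.Str.join " | " points
  else "Sem fatos recentes para resumir."

-- ===== PRECONDITION & SPEC =====
def Spec_build_semantic_summary (recent_entries : List (String × String)) (out : String) : Prop := out = build_semantic_summary_alt recent_entries
instance (recent_entries : List (String × String)) (out : String) : Decidable (Spec_build_semantic_summary recent_entries out) := by unfold Spec_build_semantic_summary; infer_instance

-- ===== CLAIM (what is proved, stated in full; the proofs are below) =====
def Claim_equal_build_semantic_summary : Prop := ∀ (recent_entries : List (String × String)), Dom_build_semantic_summary recent_entries → Spec_build_semantic_summary recent_entries (build_semantic_summary recent_entries)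

-- ===== LEMMAS AND PROOFS =====

-- first content of l whose role matches and is non-empty, or ""
def pvFirstOf (role : String) (l : List (String × String)) : String :=
  ((((l.filter (fun p => p.1 == role && p.2 != "")).map Prod.snd)).head?).getD ""

theorem pvLoopA_eq (l : List (String × String)) : ∀ lu la : String,
    pvLoopA l lu la =
      ((if lu == "" then pvFirstOf "usuario" l else lu),
       (if la == "" then pvFirstOf "agente" l else la)) := by
  induction l with
  | nil => intro lu la; simp [pvLoopA, pvFirstOf]
  | cons hd tl ih =>
    intro lu la
    obtain ⟨r, c⟩ := hd
    simp only [pvLoopA, ih]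
    by_cases hru : r = "usuario" <;> by_cases hra : r = "agente" <;>
      by_cases hc : c = "" <;> by_cases hlu : lu = "" <;> by_cases hla : la = "" <;>
      simp_all [pvFirstOf]

theorem pvFirstOf_reverse (role : String) (l : List (String × String)) :
    pvFirstOf role l.reverse =
      (((l.filter (fun p => p.1 == role && p.2 != "")).map Prod.snd).getLast?).getD "" := by
  simp [pvFirstOf, List.filter_reverse, List.map_reverse, List.head?_reverse]

theorem pvGetLast?_ne_empty (l : List (String × String)) (role : String) (u : String)
    (h : ((l.filter (fun p => p.1 == role && p.2 != "")).map Prod.snd).getLast? = some u) :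
    u ≠ "" := by
  have hu : u ∈ (l.filter (fun p => p.1 == role && p.2 != "")).map Prod.snd :=
    List.mem_of_getLast? h
  obtain ⟨p, hp, rfl⟩ := List.mem_map.mp hu
  have := List.of_mem_filter hp
  simp at this
  exact this.2

-- ===== VERDICT (by name: the statement is the Claim_ definition above) =====
theorem build_semantic_summary_spec : Claim_equal_build_semantic_summary := by
  intro l _
  unfold Spec_build_semantic_summary build_semantic_summary build_semantic_summary_alt
  by_cases hl : l = []
  · simp [hl]
  · simp only [hl, beq_iff_eq]
    rw [pvLoopA_eq, pvFirstOf_reverse, pvFirstOf_reverse]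
    cases hu : ((l.filter (fun p => p.1 == "usuario" && p.2 != "")).map Prod.snd).getLast? with
    | none =>
      cases ha : ((l.filter (fun p => p.1 == "agente" && p.2 != "")).map Prod.snd).getLast? with
      | none => simp [ha]
      | some a => simp [ha, pvGetLast?_ne_empty l "agente" a ha]
    | some u =>
      cases ha : ((l.filter (fun p => p.1 == "agente" && p.2 != "")).map Prod.snd).getLast? with
      | none => simp [pvGetLast?_ne_empty l "usuario" u hu]
      | some a => simp [pvGetLast?_ne_empty l "usuario" u hu, pvGetLast?_ne_empty l "agente" a ha]
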